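-- pv_equiv track=rewrite | github.com/felipesasso/CodeSignal | challenges/s_challenges.py | square_digits_sequence
-- ===== SOURCE A (Python) =====
-- def square_digits_sequence(a0):
--     ''' Consider a sequence of numbers a0, a1, ..., an, in which an element is
--         equal to the sum of squared digits of the previous element.
--         The sequence ends once an element that has already been in the
--         sequence appears again.
--         Given the first element a0, find the length of the sequence.
--     '''
--     previous_numbers = set([a0])
--     count = 1
--     while True:
--         a0 = sum([x**2 for x in map(int, str(a0))])
--         count += 1
--         if a0 in previous_numbers:
--             return count
--         previous_numbers.add(a0)
-- ===== SOURCE B (Python) =====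
-- def square_digits_sequence(a0):
--     def step(x):
--         return sum(int(d) ** 2 for d in str(x))
--
--     k, x = 1, step(a0)          # x = step^k(a0)
--     while True:
--         # is x equal to one of the k earlier terms of the sequence?
--         y = a0
--         for _ in range(k):
--             if y == x:
--                 return k + 1
--             y = step(y)
--         k += 1
--         x = step(x)
-- ===== Notes on version B (the rewrite author's own statement) =====
-- stated objective: alternative
-- what changed: B keeps no 'seen' set at all: it searches for the least step count whose iterate repeats an earlier iterate by re-iterating the step function from the start value, instead of A's single pass that accumulates every value in a set.
import Mathlib
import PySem

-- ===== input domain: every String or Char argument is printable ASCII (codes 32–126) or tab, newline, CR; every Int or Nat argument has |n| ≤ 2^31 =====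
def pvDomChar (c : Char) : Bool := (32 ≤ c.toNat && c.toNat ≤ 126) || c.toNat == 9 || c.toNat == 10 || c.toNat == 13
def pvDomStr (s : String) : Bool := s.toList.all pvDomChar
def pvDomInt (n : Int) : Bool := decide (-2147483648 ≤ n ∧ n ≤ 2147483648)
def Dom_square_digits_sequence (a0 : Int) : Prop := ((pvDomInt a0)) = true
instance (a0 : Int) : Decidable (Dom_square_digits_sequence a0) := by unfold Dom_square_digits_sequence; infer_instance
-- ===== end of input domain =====

-- B keeps no 'seen' set: it searches for the least k whose iterate repeats an earlier
-- iterate by re-iterating the step function from a0 (alternative decomposition, not faster).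
-- Both Pythons raise ValueError on negative a0 (int of the sign char); Pre_ excludes exactly those inputs.

-- ===== PORT A =====
-- sum([x**2 for x in map(int, str(a0))]); int(d) on a single char.  `.getD 0` is only
-- reached on the '-' sign character, i.e. for negative input, which Pre_ excludes
-- (Python raises ValueError there).
def pvStepA (n : Int) : Int :=
  (((PySem.Int.toStr n).toList.map
      (fun c => (PySem.Int.ofStr? (String.ofList [c])).getD 0)).map (fun x => x ^ 2)).sum

-- the `while True` loop; the fuel counter only makes the recursion structural, the
-- Python loop returns long before pvFuel steps on every admitted input.
def pvLoopA (fuel : Nat) (cur : Int) (seen : PySem.Set Int) (count : Int) : Int :=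
  match fuel with
  | 0 => count
  | fuel + 1 =>
    let cur' := pvStepA cur
    let count' := count + 1
    if PySem.Set.contains seen cur' then count'
    else pvLoopA fuel cur' (PySem.Set.add seen cur') count'

def pvFuel : Nat := 4294967296

def square_digits_sequence (a0 : Int) : Int :=
  pvLoopA pvFuel a0 (PySem.Set.ofList [a0]) 1

-- ===== PORT B =====
-- step(x) of Source B (same expression as A's)
def pvStepB (n : Int) : Int :=
  (((PySem.Int.toStr n).toList.map
      (fun c => (PySem.Int.ofStr? (String.ofList [c])).getD 0)).map (fun x => x ^ 2)).sum

-- the inner `for _ in range(k)` loop: does some iterate step^j(a0), j < k, equal x?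
def pvInnerB (k : Nat) (y x : Int) : Bool :=
  match k with
  | 0 => false
  | k + 1 => if y == x then true else pvInnerB k (pvStepB y) x

-- the outer `while True` loop (fuel as in port A)
def pvLoopB (fuel : Nat) (k : Int) (x : Int) (a0 : Int) : Int :=
  match fuel with
  | 0 => k
  | fuel + 1 =>
    if pvInnerB k.toNat a0 x then k + 1
    else pvLoopB fuel (k + 1) (pvStepB x) a0

def square_digits_sequence_alt (a0 : Int) : Int :=
  pvLoopB pvFuel 1 (pvStepB a0) a0

-- ===== PRECONDITION & SPEC =====
-- Python A raises ValueError on negative a0 (int of the sign character); Source B raises there too.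
def Pre_square_digits_sequence (a0 : Int) : Prop := 0 ≤ a0
instance (a0 : Int) : Decidable (Pre_square_digits_sequence a0) := by
  unfold Pre_square_digits_sequence; infer_instance
def pvWitness_square_digits_sequence : Int := 16

def Spec_square_digits_sequence (a0 : Int) (out : Int) : Prop := out = square_digits_sequence_alt a0
instance (a0 : Int) (out : Int) : Decidable (Spec_square_digits_sequence a0 out) := by unfold Spec_square_digits_sequence; infer_instance

-- ===== CLAIM (what is proved, stated in full; the proofs are below) =====
def Claim_equal_square_digits_sequence : Prop := ∀ (a0 : Int), Dom_square_digits_sequence a0 → Pre_square_digits_sequence a0 → Spec_square_digits_sequence a0 (square_digits_sequence a0)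

-- ===== LEMMAS AND PROOFS =====

theorem pvStep_eq : pvStepB = pvStepA := rfl

-- pvInnerB started at an iterate: true iff x occurs among the next k iterates
theorem pvInnerB_iff (k m : Nat) (a0 x : Int) :
    pvInnerB k (pvStepA^[m] a0) x = true ↔ ∃ j < k, pvStepA^[m + j] a0 = x := by
  induction k generalizing m with
  | zero => simp [pvInnerB]
  | succ k ih =>
    rw [pvInnerB, pvStep_eq]
    by_cases h : pvStepA^[m] a0 = x
    · simp only [h, beq_self_eq_true, if_true, true_iff]
      exact ⟨0, Nat.succ_pos _, by simpa using h⟩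
    · have hb : ((pvStepA^[m] a0) == x) = false := by simp [h]
      rw [if_neg (by simp [hb])]
      have hstep : pvStepA (pvStepA^[m] a0) = pvStepA^[m + 1] a0 :=
        (Function.iterate_succ_apply' pvStepA m a0).symm
      rw [hstep, ih (m + 1)]
      constructor
      · rintro ⟨j, hj, hx⟩
        exact ⟨j + 1, by omega, by rw [← hx]; congr 1; omega⟩
      · rintro ⟨j, hj, hx⟩
        rcases Nat.eq_zero_or_pos j with h0 | h0
        · exact absurd (by simpa [h0] using hx) h
        · exact ⟨j - 1, by omega, by rw [← hx]; congr 1; omega⟩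

-- main invariant: after i completed iterations the two loop states correspond
theorem pvLoop_eq (fuel : Nat) (a0 : Int) :
    ∀ (i : Nat) (seen : PySem.Set Int),
      (∀ v, v ∈ seen ↔ ∃ j ≤ i, pvStepA^[j] a0 = v) →
      pvLoopA fuel (pvStepA^[i] a0) seen ((i : Int) + 1)
        = pvLoopB fuel ((i : Int) + 1) (pvStepA^[i + 1] a0) a0 := by
  induction fuel with
  | zero => intro i seen _; simp [pvLoopA, pvLoopB]
  | succ fuel ih =>
    intro i seen hseen
    rw [pvLoopA, pvLoopB]
    have hcur : pvStepA (pvStepA^[i] a0) = pvStepA^[i + 1] a0 :=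
      (Function.iterate_succ_apply' pvStepA i a0).symm
    have htoNat : ((i : Int) + 1).toNat = i + 1 := by omega
    have hcond : PySem.Set.contains seen (pvStepA (pvStepA^[i] a0))
        = pvInnerB ((i : Int) + 1).toNat a0 (pvStepA^[i + 1] a0) := by
      rw [htoNat, hcur]
      by_cases hmem : pvStepA^[i + 1] a0 ∈ seen
      · have h1 : PySem.Set.contains seen (pvStepA^[i + 1] a0) = true :=
          (PySem.Set.contains_iff seen _).mpr hmem
        have h2 : pvInnerB (i + 1) a0 (pvStepA^[i + 1] a0) = true := by
          rcases (hseen _).mp hmem with ⟨j, hj, hx⟩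
          exact (pvInnerB_iff (i + 1) 0 a0 _).mpr ⟨j, by omega, by simpa using hx⟩
        rw [h1, h2]
      · have h1 : PySem.Set.contains seen (pvStepA^[i + 1] a0) = false := by
          cases h : PySem.Set.contains seen (pvStepA^[i + 1] a0)
          · rfl
          · exact absurd ((PySem.Set.contains_iff seen _).mp h) hmem
        have h2 : pvInnerB (i + 1) a0 (pvStepA^[i + 1] a0) = false := by
          cases h : pvInnerB (i + 1) a0 (pvStepA^[i + 1] a0)
          · rfl
          · rcases (pvInnerB_iff (i + 1) 0 a0 _).mp h with ⟨j, hj, hx⟩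
            exact absurd ((hseen _).mpr ⟨j, by omega, by simpa using hx⟩) hmem
        rw [h1, h2]
    rw [hcond]
    split
    · omega
    · rw [hcur]
      have hstep2 : pvStepB (pvStepA^[i + 1] a0) = pvStepA^[(i + 1) + 1] a0 := by
        rw [pvStep_eq]
        exact (Function.iterate_succ_apply' pvStepA (i + 1) a0).symm
      have hseen' : ∀ v, v ∈ PySem.Set.add seen (pvStepA^[i + 1] a0)
          ↔ ∃ j ≤ i + 1, pvStepA^[j] a0 = v := by
        intro v
        rw [PySem.Set.mem_add, hseen]
        constructor
        · rintro (⟨j, hj, hx⟩ | h)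
          · exact ⟨j, by omega, hx⟩
          · exact ⟨i + 1, le_refl _, h.symm⟩
        · rintro ⟨j, hj, hx⟩
          rcases Nat.lt_or_ge j (i + 1) with hlt | hge
          · exact Or.inl ⟨j, by omega, hx⟩
          · exact Or.inr (by rw [← hx]; congr 1; omega)
      rw [hstep2]
      have h2 : ((i : Int) + 1) + 1 = ((i + 1 : Nat) : Int) + 1 := by push_cast; ring
      rw [h2]
      exact ih (i + 1) (PySem.Set.add seen (pvStepA^[i + 1] a0)) hseen'

-- ===== VERDICT (by name: the statement is the Claim_ definition above) =====
theorem square_digits_sequence_spec : Claim_equal_square_digits_sequence := by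
  intro a0 _ _
  unfold Spec_square_digits_sequence square_digits_sequence square_digits_sequence_alt
  have h0 : ∀ v, v ∈ PySem.Set.ofList [a0] ↔ ∃ j ≤ 0, pvStepA^[j] a0 = v := by
    intro v
    rw [PySem.Set.mem_ofList]
    simp
    exact ⟨fun h => h.symm, fun h => h.symm⟩
  have := pvLoop_eq pvFuel a0 0 (PySem.Set.ofList [a0]) h0
  simpa [pvStep_eq] using this
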